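-- pv_equiv track=rewrite | github.com/MikolajMadej/Euler-Project | problems-51-100/euler_089.py | optimise
-- ===== SOURCE A (Python) =====
-- def optimise(number):
--     result = number
--
--     replacements = [
--     ("VIIII", "IX"),
--     ("IIII", "IV"),
--     ("LXXXX", "XC"),
--     ("XXXX", "XL"),
--     ("DCCCC", "CM"),
--     ("CCCC", "CD")]
--
--     for old, new in replacements:
--         result = result.replace(old, new)
--
--     return result
-- ===== SOURCE B (Python) =====
-- PATTERNS = (("VIIII", "IX"), ("IIII", "IV"), ("LXXXX", "XC"),
--             ("XXXX", "XL"), ("DCCCC", "CM"), ("CCCC", "CD"))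
--
-- def optimise(number):
--     parts = []
--     i = 0
--     n = len(number)
--     while i < n:
--         for old, new in PATTERNS:
--             if number.startswith(old, i):
--                 parts.append(new)
--                 i += len(old)
--                 break
--         else:
--             parts.append(number[i])
--             i += 1
--     return "".join(parts)
-- ===== Notes on version B (the rewrite author's own statement) =====
-- stated objective: alternative
-- what changed: A makes six sequential whole-string str.replace passes; B makes a single left-to-right scan that at each position greedily matches one of the six patterns (first character decides) and emits its replacement, joining the pieces once. …
-- outside the precondition, e.g. on optimise('IIIVIIII'): A returns 'IVX', B returns 'IIIIX'; on optimise('VIIIIXXX'): A returns 'IXL', B returns 'IXXXX'; on optimise('XXXLXXXX'): A returns 'XLC', B returns 'XXXXC'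
import Mathlib
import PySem

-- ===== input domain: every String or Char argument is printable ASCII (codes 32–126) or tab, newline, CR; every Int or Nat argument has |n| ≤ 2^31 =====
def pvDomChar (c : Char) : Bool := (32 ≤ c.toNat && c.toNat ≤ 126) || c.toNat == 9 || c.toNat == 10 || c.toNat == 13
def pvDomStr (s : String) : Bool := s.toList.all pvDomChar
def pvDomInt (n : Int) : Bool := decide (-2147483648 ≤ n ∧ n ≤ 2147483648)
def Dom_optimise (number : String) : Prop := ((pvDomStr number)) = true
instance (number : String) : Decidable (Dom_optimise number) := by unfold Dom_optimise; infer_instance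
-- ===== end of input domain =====

-- B replaces A's six sequential str.replace passes by a single greedy left-to-right scan;
-- same algorithmic cost, different structure (objective: alternative).

-- ===== PORT A =====
def optimise (number : String) : String :=
  let replacements : List (String × String) :=
    [("VIIII", "IX"), ("IIII", "IV"), ("LXXXX", "XC"),
     ("XXXX", "XL"), ("DCCCC", "CM"), ("CCCC", "CD")]
  replacements.foldl (fun result p => PySem.Str.replace result p.1 p.2) number

-- ===== PORT B =====
-- the scanning while-loop of Source B: at each position try the six patterns in order,
-- on a match emit the replacement and advance by the matched length, else copy one char
def optimiseScan (s : List Char) : List Char :=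
  match s with
  | [] => []
  | c :: t =>
    if ['V','I','I','I','I'].isPrefixOf (c :: t) then ['I','X'] ++ optimiseScan (t.drop 4)
    else if ['I','I','I','I'].isPrefixOf (c :: t) then ['I','V'] ++ optimiseScan (t.drop 3)
    else if ['L','X','X','X','X'].isPrefixOf (c :: t) then ['X','C'] ++ optimiseScan (t.drop 4)
    else if ['X','X','X','X'].isPrefixOf (c :: t) then ['X','L'] ++ optimiseScan (t.drop 3)
    else if ['D','C','C','C','C'].isPrefixOf (c :: t) then ['C','M'] ++ optimiseScan (t.drop 4)
    else if ['C','C','C','C'].isPrefixOf (c :: t) then ['C','D'] ++ optimiseScan (t.drop 3)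
    else c :: optimiseScan t
termination_by s.length
decreasing_by all_goals (simp; try omega)

def optimise_alt (number : String) : String := String.ofList (optimiseScan number.toList)

-- ===== PRECONDITION & SPEC =====
-- Pre_ excludes strings containing one of seven "glue" contexts, in which the output of one
-- replacement abuts a same-letter run and a later pass may rewrite across the seam: such strings
-- are not additive Roman numerals, no behaviour is specified for them, and the sequential-pass
-- value and the single-pass value are two equally defensible readings.
def pvBadT : List (List Char) :=
  [['I','I','I','V','I','I','I','I'],
   ['V','I','I','I','I','X','X','X'],
   ['X','X','X','L','X','X','X','X'],
   ['L','X','X','X','X','C','C','C'],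
   ['C','C','C','D','C','C','C','C'],
   ['V','I','I','I','I','X','X','L','X','X','X','X'],
   ['L','X','X','X','X','C','C','D','C','C','C','C']]

def Pre_optimise (number : String) : Prop := ∀ b ∈ pvBadT, ¬ b <:+: number.toList
instance (number : String) : Decidable (Pre_optimise number) := by unfold Pre_optimise; infer_instance

def pvWitness_optimise : String := "MCMXCIIII"

def Spec_optimise (number : String) (out : String) : Prop := out = optimise_alt number
instance (number : String) (out : String) : Decidable (Spec_optimise number out) := by unfold Spec_optimise; infer_instance

-- ===== CLAIM (what is proved, stated in full; the proofs are below) =====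
def Claim_equal_optimise : Prop := ∀ (number : String), Dom_optimise number → Pre_optimise number → Spec_optimise number (optimise number)

-- ===== LEMMAS AND PROOFS =====

-- list-level view of A: the six passes, innermost first
def pvPassA (s : List Char) : List Char :=
  PySem.Chars.replace
    (PySem.Chars.replace
      (PySem.Chars.replace
        (PySem.Chars.replace
          (PySem.Chars.replace
            (PySem.Chars.replace s ['V','I','I','I','I'] ['I','X'])
            ['I','I','I','I'] ['I','V'])
          ['L','X','X','X','X'] ['X','C'])
        ['X','X','X','X'] ['X','L'])
      ['D','C','C','C','C'] ['C','M'])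
    ['C','C','C','C'] ['C','D']

theorem pv_optimise_toList (number : String) :
    (optimise number).toList = pvPassA number.toList := by
  simp [optimise, List.foldl, PySem.Str.toList_replace, pvPassA]


theorem pv_go_acc (old new : List Char) (fuel : Nat) :
    ∀ (l acc : List Char),
      PySem.Chars.replace.go old new fuel l acc = acc.reverse ++ PySem.Chars.replace.go old new fuel l [] := by
  induction fuel with
  | zero => intro l acc; simp [PySem.Chars.replace.go]
  | succ f ih =>
    intro l acc
    cases l with
    | nil => simp [PySem.Chars.replace.go]
    | cons c t =>
      rw [PySem.Chars.replace.go, PySem.Chars.replace.go]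
      by_cases h : old.isPrefixOf (c :: t)
      · simp only [h, if_true]
        rw [ih _ (new.reverse ++ acc), ih _ (new.reverse ++ [])]
        simp
      · simp only [h]
        rw [ih t (c :: acc), ih t (c :: [])]
        simp

theorem pv_go_fuel (old new : List Char) (hold : old ≠ []) (fuel : Nat) :
    ∀ (l acc : List Char), l.length ≤ fuel →
      PySem.Chars.replace.go old new fuel l acc = PySem.Chars.replace.go old new l.length l acc := by
  induction fuel using Nat.strong_induction_on with
  | _ fuel ih =>
    intro l acc hl
    cases l with
    | nil => cases fuel with
      | zero => rfl
      | succ f => simp [PySem.Chars.replace.go]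
    | cons c t =>
      simp only [List.length_cons] at hl
      obtain ⟨f, rfl⟩ : ∃ f, fuel = f + 1 := ⟨fuel - 1, by omega⟩
      have e1 : PySem.Chars.replace.go old new (f+1) (c :: t) acc =
          (if old.isPrefixOf (c :: t) then
            PySem.Chars.replace.go old new f ((c :: t).drop old.length) (new.reverse ++ acc)
          else PySem.Chars.replace.go old new f t (c :: acc)) := by
        rw [PySem.Chars.replace.go]
      have e2 : PySem.Chars.replace.go old new (c :: t).length (c :: t) acc =
          (if old.isPrefixOf (c :: t) then
            PySem.Chars.replace.go old new t.length ((c :: t).drop old.length) (new.reverse ++ acc)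
          else PySem.Chars.replace.go old new t.length t (c :: acc)) := by
        rw [show (c :: t).length = t.length + 1 from rfl, PySem.Chars.replace.go]
      rw [e1, e2]
      by_cases h : old.isPrefixOf (c :: t)
      · simp only [h, if_true]
        have hlen : ((c :: t).drop old.length).length ≤ t.length := by
          simp only [List.length_drop, List.length_cons]
          have : 1 ≤ old.length := List.length_pos_iff.mpr hold
          omega
        rw [ih f (by omega) _ _ (le_trans hlen (by omega)),
            ih t.length (by omega) _ _ hlen]
      · simp only [h]
        rw [ih f (by omega) t _ (by omega), ih t.length (by omega) t _ le_rfl]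
        simp

theorem pv_replace_nil (old new : List Char) (hold : old ≠ []) :
    PySem.Chars.replace [] old new = [] := by
  simp [PySem.Chars.replace, List.isEmpty_iff, hold, PySem.Chars.replace.go]

theorem pv_replace_match (old new l : List Char) (hold : old ≠ []) (h : old <+: l) :
    PySem.Chars.replace l old new = new ++ PySem.Chars.replace (l.drop old.length) old new := by
  have hne : l ≠ [] := by
    intro rfl_
    subst rfl_
    exact hold (List.prefix_nil.mp h)
  obtain ⟨c, t, rfl⟩ := List.exists_cons_of_ne_nil hne
  have hEmpty : old.isEmpty = false := by simp [hold]
  simp only [PySem.Chars.replace, hEmpty, Bool.false_eq_true, if_false]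
  have hpre : old.isPrefixOf (c :: t) = true := List.isPrefixOf_iff_prefix.mpr h
  rw [show (c :: t).length = t.length + 1 from rfl, PySem.Chars.replace.go]
  simp only [hpre, if_true]
  have hdl : ((c :: t).drop old.length).length ≤ t.length := by
    simp only [List.length_drop, List.length_cons]
    have : 1 ≤ old.length := List.length_pos_iff.mpr hold
    omega
  rw [pv_go_fuel old new hold t.length _ _ hdl, pv_go_acc]
  simp

theorem pv_replace_nomatch (old new : List Char) (c : Char) (t : List Char) (hold : old ≠ [])
    (h : ¬ old <+: (c :: t)) :
    PySem.Chars.replace (c :: t) old new = c :: PySem.Chars.replace t old new := by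
  have hEmpty : old.isEmpty = false := by simp [hold]
  simp only [PySem.Chars.replace, hEmpty, Bool.false_eq_true, if_false]
  have hpre : old.isPrefixOf (c :: t) = false := by
    rw [Bool.eq_false_iff]
    intro hc
    exact h (List.isPrefixOf_iff_prefix.mp hc)
  rw [show (c :: t).length = t.length + 1 from rfl, PySem.Chars.replace.go]
  simp only [hpre, Bool.false_eq_true, if_false]
  rw [pv_go_acc]
  simp

theorem pv_peel (old : List Char) (a : Char) (n' : List Char) (hold : old ≠ []) :
    ∀ (q v : List Char), a ∉ q → q <+: PySem.Chars.replace v old (a :: n') → q <+: v := by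
  intro q
  induction q with
  | nil => intro v _ _; exact List.nil_prefix
  | cons d q' ih =>
    intro v ha hq
    cases v with
    | nil => rw [pv_replace_nil old _ hold] at hq; exact absurd (List.prefix_nil.mp hq) (by simp)
    | cons c t =>
      by_cases hm : old <+: (c :: t)
      · rw [pv_replace_match old _ _ hold hm] at hq
        simp only [List.cons_append, List.cons_prefix_cons] at hq
        exact absurd hq.1 (by simp at ha; tauto)
      · rw [pv_replace_nomatch old _ c t hold hm] at hq
        simp only [List.cons_prefix_cons] at hq
        obtain ⟨rfl, hq'⟩ := hq
        simp only [List.cons_prefix_cons, true_and]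
        exact ih t (by simp at ha; tauto) hq'

theorem pv_peel3 (old : List Char) (a b : Char) (hab : b ≠ a) (hold : old ≠ []) :
    ∀ (v : List Char), [a,a,a] <+: PySem.Chars.replace v old [a,b] →
      [a,a,a] <+: v ∨ ([a,a] ++ old) <+: v := by
  have step : ∀ (q : List Char) (v : List Char), (a :: q) <+: PySem.Chars.replace v old [a,b] →
      (∃ t, v = a :: t ∧ q <+: PySem.Chars.replace t old [a,b]) ∨
      (old <+: v ∧ q <+: b :: PySem.Chars.replace (v.drop old.length) old [a,b]) := by
    intro q v hq
    cases v with
    | nil => rw [pv_replace_nil old _ hold] at hq; exact absurd (List.prefix_nil.mp hq) (by simp)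
    | cons c t =>
      by_cases hm : old <+: (c :: t)
      · rw [pv_replace_match old _ _ hold hm] at hq
        simp only [List.cons_append, List.cons_prefix_cons] at hq
        exact Or.inr ⟨hm, hq.2⟩
      · rw [pv_replace_nomatch old _ c t hold hm] at hq
        simp only [List.cons_prefix_cons] at hq
        obtain ⟨rfl, hq'⟩ := hq
        exact Or.inl ⟨t, rfl, hq'⟩
  intro v hq
  rcases step _ v hq with ⟨t1, rfl, h1⟩ | ⟨hm, _⟩
  · rcases step _ t1 h1 with ⟨t2, rfl, h2⟩ | ⟨hm, _⟩
    · rcases step _ t2 h2 with ⟨t3, rfl, _⟩ | ⟨hm, _⟩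
      · exact Or.inl (by simp [List.cons_prefix_cons])
      · right
        simp only [List.cons_append, List.cons_prefix_cons, true_and]
        exact hm
    · -- [a,a] <+: b :: …  impossible? here q = [a,a], hq was (a::[a,a]) pattern:
      -- second char of replacement is b ≠ a
      rename_i h2
      simp only [List.cons_prefix_cons] at h2
      exact absurd h2.1.symm hab
  · rename_i h1
    simp only [List.cons_prefix_cons] at h1
    exact absurd h1.1.symm hab

theorem pv_pass (h : Char) (old' new : List Char) :
    ∀ (w u : List Char), (∀ c ∈ w, c ≠ h) →
      PySem.Chars.replace (w ++ u) (h :: old') new = w ++ PySem.Chars.replace u (h :: old') new := by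
  intro w
  induction w with
  | nil => intro u _; simp
  | cons c w' ih =>
    intro u hw
    have hm : ¬ (h :: old') <+: (c :: (w' ++ u)) := by
      simp only [List.cons_prefix_cons]
      intro ⟨he, _⟩
      exact (hw c (by simp)) he.symm
    rw [List.cons_append, pv_replace_nomatch _ _ _ _ (by simp) hm, ih u (fun c hc => hw c (by simp [hc]))]
    simp

-- Pre (list level) and closure under infix
def pvPreL (s : List Char) : Prop := ∀ b ∈ pvBadT, ¬ b <:+: s

theorem pvPreL_mono {s u : List Char} (h : u <:+: s) (hp : pvPreL s) : pvPreL u :=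
  fun b hb hbu => hp b hb (hbu.trans h)


theorem pv_step2 (old new : List Char) (hold : old ≠ []) (a b : Char) (w : List Char)
    (h1 : ¬ old <+: (a :: b :: w)) (h2 : ¬ old <+: (b :: w)) :
    PySem.Chars.replace (a :: b :: w) old new = a :: b :: PySem.Chars.replace w old new := by
  rw [pv_replace_nomatch _ _ _ _ hold h1, pv_replace_nomatch _ _ _ _ hold h2]

theorem pv_caseV (u : List Char)
    (hrec : pvPassA u = optimiseScan u)
    (h1 : ¬ ['X','X','X'] <+: u)
    (h2 : ¬ ['X','X','L','X','X','X','X'] <+: u) :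
    pvPassA (['V','I','I','I','I'] ++ u) = optimiseScan (['V','I','I','I','I'] ++ u) := by
  have hscan : optimiseScan ('V' :: 'I' :: 'I' :: 'I' :: 'I' :: u) = 'I' :: 'X' :: optimiseScan u := by
    simp [optimiseScan]
  have hXXX3 : ¬ ['X','X','X'] <+:
      PySem.Chars.replace (PySem.Chars.replace (PySem.Chars.replace u ['V','I','I','I','I'] ['I','X'])
        ['I','I','I','I'] ['I','V']) ['L','X','X','X','X'] ['X','C'] := by
    intro hx
    rcases pv_peel3 ['L','X','X','X','X'] 'X' 'C' (by decide) (by simp) _ hx with h | h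
    · exact h1 (pv_peel ['V','I','I','I','I'] 'I' ['X'] (by simp) _ _ (by decide)
        (pv_peel ['I','I','I','I'] 'I' ['V'] (by simp) _ _ (by decide) h))
    · exact h2 (pv_peel ['V','I','I','I','I'] 'I' ['X'] (by simp) _ _ (by decide)
        (pv_peel ['I','I','I','I'] 'I' ['V'] (by simp) _ _ (by decide) h))
  simp only [pvPassA]
  rw [pv_replace_match ['V','I','I','I','I'] ['I','X'] _ (by simp) (List.prefix_append _ _),
      List.drop_left]
  simp only [List.cons_append, List.nil_append]
  rw [pv_step2 ['I','I','I','I'] ['I','V'] (by simp) 'I' 'X' _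
        (by simp [List.cons_prefix_cons]) (by simp [List.cons_prefix_cons])]
  rw [pv_step2 ['L','X','X','X','X'] ['X','C'] (by simp) 'I' 'X' _
        (by simp [List.cons_prefix_cons]) (by simp [List.cons_prefix_cons])]
  rw [pv_step2 ['X','X','X','X'] ['X','L'] (by simp) 'I' 'X' _
        (by simp [List.cons_prefix_cons])
        (by simp only [List.cons_prefix_cons]; intro ⟨_, hx⟩; exact hXXX3 hx)]
  rw [pv_step2 ['D','C','C','C','C'] ['C','M'] (by simp) 'I' 'X' _
        (by simp [List.cons_prefix_cons]) (by simp [List.cons_prefix_cons])]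
  rw [pv_step2 ['C','C','C','C'] ['C','D'] (by simp) 'I' 'X' _
        (by simp [List.cons_prefix_cons]) (by simp [List.cons_prefix_cons])]
  rw [hscan, ← hrec]
  simp [pvPassA]


theorem pv_caseI (u : List Char) (hrec : pvPassA u = optimiseScan u) :
    pvPassA (['I','I','I','I'] ++ u) = optimiseScan (['I','I','I','I'] ++ u) := by
  have hscan : optimiseScan ('I' :: 'I' :: 'I' :: 'I' :: u) = 'I' :: 'V' :: optimiseScan u := by
    simp [optimiseScan]
  simp only [pvPassA]
  rw [pv_pass 'V' ['I','I','I','I'] ['I','X'] ['I','I','I','I'] u (by simp)]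
  rw [pv_replace_match ['I','I','I','I'] ['I','V'] _ (by simp) (List.prefix_append _ _),
      List.drop_left]
  simp only [List.cons_append, List.nil_append]
  rw [pv_step2 ['L','X','X','X','X'] ['X','C'] (by simp) 'I' 'V' _
        (by simp [List.cons_prefix_cons]) (by simp [List.cons_prefix_cons])]
  rw [pv_step2 ['X','X','X','X'] ['X','L'] (by simp) 'I' 'V' _
        (by simp [List.cons_prefix_cons]) (by simp [List.cons_prefix_cons])]
  rw [pv_step2 ['D','C','C','C','C'] ['C','M'] (by simp) 'I' 'V' _
        (by simp [List.cons_prefix_cons]) (by simp [List.cons_prefix_cons])]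
  rw [pv_step2 ['C','C','C','C'] ['C','D'] (by simp) 'I' 'V' _
        (by simp [List.cons_prefix_cons]) (by simp [List.cons_prefix_cons])]
  rw [hscan, ← hrec]
  simp [pvPassA]

theorem pv_caseL (u : List Char) (hrec : pvPassA u = optimiseScan u)
    (h1 : ¬ ['C','C','C'] <+: u)
    (h2 : ¬ ['C','C','D','C','C','C','C'] <+: u) :
    pvPassA (['L','X','X','X','X'] ++ u) = optimiseScan (['L','X','X','X','X'] ++ u) := by
  have hscan : optimiseScan ('L' :: 'X' :: 'X' :: 'X' :: 'X' :: u) = 'X' :: 'C' :: optimiseScan u := by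
    simp [optimiseScan]
  have hCCC5 : ¬ ['C','C','C'] <+:
      PySem.Chars.replace (PySem.Chars.replace (PySem.Chars.replace (PySem.Chars.replace
        (PySem.Chars.replace u ['V','I','I','I','I'] ['I','X']) ['I','I','I','I'] ['I','V'])
        ['L','X','X','X','X'] ['X','C']) ['X','X','X','X'] ['X','L']) ['D','C','C','C','C'] ['C','M'] := by
    intro hx
    rcases pv_peel3 ['D','C','C','C','C'] 'C' 'M' (by decide) (by simp) _ hx with h | h
    · exact h1 (pv_peel ['V','I','I','I','I'] 'I' ['X'] (by simp) _ _ (by decide)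
        (pv_peel ['I','I','I','I'] 'I' ['V'] (by simp) _ _ (by decide)
          (pv_peel ['L','X','X','X','X'] 'X' ['C'] (by simp) _ _ (by decide)
            (pv_peel ['X','X','X','X'] 'X' ['L'] (by simp) _ _ (by decide) h))))
    · exact h2 (pv_peel ['V','I','I','I','I'] 'I' ['X'] (by simp) _ _ (by decide)
        (pv_peel ['I','I','I','I'] 'I' ['V'] (by simp) _ _ (by decide)
          (pv_peel ['L','X','X','X','X'] 'X' ['C'] (by simp) _ _ (by decide)
            (pv_peel ['X','X','X','X'] 'X' ['L'] (by simp) _ _ (by decide) h))))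
  simp only [pvPassA]
  rw [pv_pass 'V' ['I','I','I','I'] ['I','X'] ['L','X','X','X','X'] u (by simp)]
  rw [pv_pass 'I' ['I','I','I'] ['I','V'] ['L','X','X','X','X'] _ (by simp)]
  rw [pv_replace_match ['L','X','X','X','X'] ['X','C'] _ (by simp) (List.prefix_append _ _),
      List.drop_left]
  simp only [List.cons_append, List.nil_append]
  rw [pv_step2 ['X','X','X','X'] ['X','L'] (by simp) 'X' 'C' _
        (by simp [List.cons_prefix_cons]) (by simp [List.cons_prefix_cons])]
  rw [pv_step2 ['D','C','C','C','C'] ['C','M'] (by simp) 'X' 'C' _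
        (by simp [List.cons_prefix_cons]) (by simp [List.cons_prefix_cons])]
  rw [pv_step2 ['C','C','C','C'] ['C','D'] (by simp) 'X' 'C' _
        (by simp [List.cons_prefix_cons])
        (by simp only [List.cons_prefix_cons]; intro ⟨_, hx⟩; exact hCCC5 hx)]
  rw [hscan, ← hrec]
  simp [pvPassA]

theorem pv_caseX (u : List Char) (hrec : pvPassA u = optimiseScan u) :
    pvPassA (['X','X','X','X'] ++ u) = optimiseScan (['X','X','X','X'] ++ u) := by
  have hscan : optimiseScan ('X' :: 'X' :: 'X' :: 'X' :: u) = 'X' :: 'L' :: optimiseScan u := by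
    simp [optimiseScan]
  simp only [pvPassA]
  rw [pv_pass 'V' ['I','I','I','I'] ['I','X'] ['X','X','X','X'] u (by simp)]
  rw [pv_pass 'I' ['I','I','I'] ['I','V'] ['X','X','X','X'] _ (by simp)]
  rw [pv_pass 'L' ['X','X','X','X'] ['X','C'] ['X','X','X','X'] _ (by simp)]
  rw [pv_replace_match ['X','X','X','X'] ['X','L'] _ (by simp) (List.prefix_append _ _),
      List.drop_left]
  simp only [List.cons_append, List.nil_append]
  rw [pv_step2 ['D','C','C','C','C'] ['C','M'] (by simp) 'X' 'L' _
        (by simp [List.cons_prefix_cons]) (by simp [List.cons_prefix_cons])]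
  rw [pv_step2 ['C','C','C','C'] ['C','D'] (by simp) 'X' 'L' _
        (by simp [List.cons_prefix_cons]) (by simp [List.cons_prefix_cons])]
  rw [hscan, ← hrec]
  simp [pvPassA]

theorem pv_caseD (u : List Char) (hrec : pvPassA u = optimiseScan u) :
    pvPassA (['D','C','C','C','C'] ++ u) = optimiseScan (['D','C','C','C','C'] ++ u) := by
  have hscan : optimiseScan ('D' :: 'C' :: 'C' :: 'C' :: 'C' :: u) = 'C' :: 'M' :: optimiseScan u := by
    simp [optimiseScan]
  simp only [pvPassA]
  rw [pv_pass 'V' ['I','I','I','I'] ['I','X'] ['D','C','C','C','C'] u (by simp)]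
  rw [pv_pass 'I' ['I','I','I'] ['I','V'] ['D','C','C','C','C'] _ (by simp)]
  rw [pv_pass 'L' ['X','X','X','X'] ['X','C'] ['D','C','C','C','C'] _ (by simp)]
  rw [pv_pass 'X' ['X','X','X'] ['X','L'] ['D','C','C','C','C'] _ (by simp)]
  rw [pv_replace_match ['D','C','C','C','C'] ['C','M'] _ (by simp) (List.prefix_append _ _),
      List.drop_left]
  simp only [List.cons_append, List.nil_append]
  rw [pv_step2 ['C','C','C','C'] ['C','D'] (by simp) 'C' 'M' _
        (by simp [List.cons_prefix_cons]) (by simp [List.cons_prefix_cons])]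
  rw [hscan, ← hrec]
  simp [pvPassA]

theorem pv_caseC (u : List Char) (hrec : pvPassA u = optimiseScan u) :
    pvPassA (['C','C','C','C'] ++ u) = optimiseScan (['C','C','C','C'] ++ u) := by
  have hscan : optimiseScan ('C' :: 'C' :: 'C' :: 'C' :: u) = 'C' :: 'D' :: optimiseScan u := by
    simp [optimiseScan]
  simp only [pvPassA]
  rw [pv_pass 'V' ['I','I','I','I'] ['I','X'] ['C','C','C','C'] u (by simp)]
  rw [pv_pass 'I' ['I','I','I'] ['I','V'] ['C','C','C','C'] _ (by simp)]
  rw [pv_pass 'L' ['X','X','X','X'] ['X','C'] ['C','C','C','C'] _ (by simp)]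
  rw [pv_pass 'X' ['X','X','X'] ['X','L'] ['C','C','C','C'] _ (by simp)]
  rw [pv_pass 'D' ['C','C','C','C'] ['C','M'] ['C','C','C','C'] _ (by simp)]
  rw [pv_replace_match ['C','C','C','C'] ['C','D'] _ (by simp) (List.prefix_append _ _),
      List.drop_left]
  simp only [List.cons_append, List.nil_append]
  rw [hscan, ← hrec]
  simp [pvPassA]

theorem pv_caseNone (c : Char) (t : List Char) (hrec : pvPassA t = optimiseScan t)
    (hV : ¬ ['V','I','I','I','I'] <+: (c :: t))
    (hI : ¬ ['I','I','I','I'] <+: (c :: t))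
    (hL : ¬ ['L','X','X','X','X'] <+: (c :: t))
    (hX : ¬ ['X','X','X','X'] <+: (c :: t))
    (hD : ¬ ['D','C','C','C','C'] <+: (c :: t))
    (hC : ¬ ['C','C','C','C'] <+: (c :: t))
    (hb1 : ¬ ['I','I','I','V','I','I','I','I'] <+: (c :: t))
    (hb3 : ¬ ['X','X','X','L','X','X','X','X'] <+: (c :: t))
    (hb5 : ¬ ['C','C','C','D','C','C','C','C'] <+: (c :: t)) :
    pvPassA (c :: t) = optimiseScan (c :: t) := by
  have eV : (['V','I','I','I','I'].isPrefixOf (c :: t)) = false := by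
    rw [Bool.eq_false_iff]; intro h; exact hV (List.isPrefixOf_iff_prefix.mp h)
  have eI : (['I','I','I','I'].isPrefixOf (c :: t)) = false := by
    rw [Bool.eq_false_iff]; intro h; exact hI (List.isPrefixOf_iff_prefix.mp h)
  have eL : (['L','X','X','X','X'].isPrefixOf (c :: t)) = false := by
    rw [Bool.eq_false_iff]; intro h; exact hL (List.isPrefixOf_iff_prefix.mp h)
  have eX : (['X','X','X','X'].isPrefixOf (c :: t)) = false := by
    rw [Bool.eq_false_iff]; intro h; exact hX (List.isPrefixOf_iff_prefix.mp h)
  have eD : (['D','C','C','C','C'].isPrefixOf (c :: t)) = false := by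
    rw [Bool.eq_false_iff]; intro h; exact hD (List.isPrefixOf_iff_prefix.mp h)
  have eC : (['C','C','C','C'].isPrefixOf (c :: t)) = false := by
    rw [Bool.eq_false_iff]; intro h; exact hC (List.isPrefixOf_iff_prefix.mp h)
  have hscan : optimiseScan (c :: t) = c :: optimiseScan t := by
    rw [optimiseScan]
    simp [eV, eI, eL, eX, eD, eC]
  have n2 : ¬ ['I','I','I','I'] <+: c :: PySem.Chars.replace t ['V','I','I','I','I'] ['I','X'] := by
    rw [List.cons_prefix_cons]
    intro ⟨hc, h'⟩
    rcases pv_peel3 ['V','I','I','I','I'] 'I' 'X' (by decide) (by simp) _ h' with h | h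
    · exact hI (List.cons_prefix_cons.mpr ⟨hc, h⟩)
    · exact hb1 (List.cons_prefix_cons.mpr ⟨hc, h⟩)
  have n3 : ¬ ['L','X','X','X','X'] <+: c :: PySem.Chars.replace
      (PySem.Chars.replace t ['V','I','I','I','I'] ['I','X']) ['I','I','I','I'] ['I','V'] := by
    rw [List.cons_prefix_cons]
    intro ⟨hc, h'⟩
    exact hL (List.cons_prefix_cons.mpr ⟨hc,
      pv_peel ['V','I','I','I','I'] 'I' ['X'] (by simp) _ _ (by decide)
        (pv_peel ['I','I','I','I'] 'I' ['V'] (by simp) _ _ (by decide) h')⟩)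
  have n4 : ¬ ['X','X','X','X'] <+: c :: PySem.Chars.replace (PySem.Chars.replace
      (PySem.Chars.replace t ['V','I','I','I','I'] ['I','X']) ['I','I','I','I'] ['I','V'])
      ['L','X','X','X','X'] ['X','C'] := by
    rw [List.cons_prefix_cons]
    intro ⟨hc, h'⟩
    rcases pv_peel3 ['L','X','X','X','X'] 'X' 'C' (by decide) (by simp) _ h' with h | h
    · exact hX (List.cons_prefix_cons.mpr ⟨hc,
        pv_peel ['V','I','I','I','I'] 'I' ['X'] (by simp) _ _ (by decide)
          (pv_peel ['I','I','I','I'] 'I' ['V'] (by simp) _ _ (by decide) h)⟩)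
    · exact hb3 (List.cons_prefix_cons.mpr ⟨hc,
        pv_peel ['V','I','I','I','I'] 'I' ['X'] (by simp) _ _ (by decide)
          (pv_peel ['I','I','I','I'] 'I' ['V'] (by simp) _ _ (by decide) h)⟩)
  have n5 : ¬ ['D','C','C','C','C'] <+: c :: PySem.Chars.replace (PySem.Chars.replace
      (PySem.Chars.replace (PySem.Chars.replace t ['V','I','I','I','I'] ['I','X'])
        ['I','I','I','I'] ['I','V']) ['L','X','X','X','X'] ['X','C']) ['X','X','X','X'] ['X','L'] := by
    rw [List.cons_prefix_cons]
    intro ⟨hc, h'⟩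
    exact hD (List.cons_prefix_cons.mpr ⟨hc,
      pv_peel ['V','I','I','I','I'] 'I' ['X'] (by simp) _ _ (by decide)
        (pv_peel ['I','I','I','I'] 'I' ['V'] (by simp) _ _ (by decide)
          (pv_peel ['L','X','X','X','X'] 'X' ['C'] (by simp) _ _ (by decide)
            (pv_peel ['X','X','X','X'] 'X' ['L'] (by simp) _ _ (by decide) h')))⟩)
  have n6 : ¬ ['C','C','C','C'] <+: c :: PySem.Chars.replace (PySem.Chars.replace
      (PySem.Chars.replace (PySem.Chars.replace (PySem.Chars.replace t
        ['V','I','I','I','I'] ['I','X']) ['I','I','I','I'] ['I','V']) ['L','X','X','X','X'] ['X','C'])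
        ['X','X','X','X'] ['X','L']) ['D','C','C','C','C'] ['C','M'] := by
    rw [List.cons_prefix_cons]
    intro ⟨hc, h'⟩
    rcases pv_peel3 ['D','C','C','C','C'] 'C' 'M' (by decide) (by simp) _ h' with h | h
    · exact hC (List.cons_prefix_cons.mpr ⟨hc,
        pv_peel ['V','I','I','I','I'] 'I' ['X'] (by simp) _ _ (by decide)
          (pv_peel ['I','I','I','I'] 'I' ['V'] (by simp) _ _ (by decide)
            (pv_peel ['L','X','X','X','X'] 'X' ['C'] (by simp) _ _ (by decide)
              (pv_peel ['X','X','X','X'] 'X' ['L'] (by simp) _ _ (by decide) h)))⟩)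
    · exact hb5 (List.cons_prefix_cons.mpr ⟨hc,
        pv_peel ['V','I','I','I','I'] 'I' ['X'] (by simp) _ _ (by decide)
          (pv_peel ['I','I','I','I'] 'I' ['V'] (by simp) _ _ (by decide)
            (pv_peel ['L','X','X','X','X'] 'X' ['C'] (by simp) _ _ (by decide)
              (pv_peel ['X','X','X','X'] 'X' ['L'] (by simp) _ _ (by decide) h)))⟩)
  simp only [pvPassA]
  rw [pv_replace_nomatch _ _ _ _ (by simp) hV]
  rw [pv_replace_nomatch _ _ _ _ (by simp) n2]
  rw [pv_replace_nomatch _ _ _ _ (by simp) n3]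
  rw [pv_replace_nomatch _ _ _ _ (by simp) n4]
  rw [pv_replace_nomatch _ _ _ _ (by simp) n5]
  rw [pv_replace_nomatch _ _ _ _ (by simp) n6]
  rw [hscan, ← hrec]
  simp [pvPassA]

theorem pv_main : ∀ (n : Nat) (s : List Char), s.length ≤ n → pvPreL s → pvPassA s = optimiseScan s := by
  intro n
  induction n with
  | zero =>
    intro s h _
    have hs : s = [] := List.eq_nil_of_length_eq_zero (Nat.le_zero.mp h)
    subst hs
    rw [show pvPassA [] = [] by
      simp only [pvPassA]
      rw [pv_replace_nil _ _ (by simp), pv_replace_nil _ _ (by simp), pv_replace_nil _ _ (by simp),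
          pv_replace_nil _ _ (by simp), pv_replace_nil _ _ (by simp), pv_replace_nil _ _ (by simp)]]
    simp [optimiseScan]
  | succ n ih =>
    intro s hlen hp
    have hp' : ∀ b ∈ pvBadT, ¬ b <+: s := fun b hb hbs => hp b hb hbs.isInfix
    by_cases hV : ['V','I','I','I','I'] <+: s
    · obtain ⟨u, rfl⟩ := hV
      refine pv_caseV u (ih u (by simp at hlen; omega)
        (pvPreL_mono (List.suffix_append _ _).isInfix hp)) ?_ ?_
      · intro hx
        obtain ⟨w, hw⟩ := hx
        exact hp' ['V','I','I','I','I','X','X','X'] (by simp [pvBadT])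
          ⟨w, by rw [← hw]; simp⟩
      · intro hx
        obtain ⟨w, hw⟩ := hx
        exact hp' ['V','I','I','I','I','X','X','L','X','X','X','X'] (by simp [pvBadT])
          ⟨w, by rw [← hw]; simp⟩
    · by_cases hI : ['I','I','I','I'] <+: s
      · obtain ⟨u, rfl⟩ := hI
        exact pv_caseI u (ih u (by simp at hlen; omega)
          (pvPreL_mono (List.suffix_append _ _).isInfix hp))
      · by_cases hL : ['L','X','X','X','X'] <+: s
        · obtain ⟨u, rfl⟩ := hL
          refine pv_caseL u (ih u (by simp at hlen; omega)
            (pvPreL_mono (List.suffix_append _ _).isInfix hp)) ?_ ?_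
          · intro hx
            obtain ⟨w, hw⟩ := hx
            exact hp' ['L','X','X','X','X','C','C','C'] (by simp [pvBadT])
              ⟨w, by rw [← hw]; simp⟩
          · intro hx
            obtain ⟨w, hw⟩ := hx
            exact hp' ['L','X','X','X','X','C','C','D','C','C','C','C'] (by simp [pvBadT])
              ⟨w, by rw [← hw]; simp⟩
        · by_cases hX : ['X','X','X','X'] <+: s
          · obtain ⟨u, rfl⟩ := hX
            exact pv_caseX u (ih u (by simp at hlen; omega)
              (pvPreL_mono (List.suffix_append _ _).isInfix hp))
          · by_cases hD : ['D','C','C','C','C'] <+: s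
            · obtain ⟨u, rfl⟩ := hD
              exact pv_caseD u (ih u (by simp at hlen; omega)
                (pvPreL_mono (List.suffix_append _ _).isInfix hp))
            · by_cases hC : ['C','C','C','C'] <+: s
              · obtain ⟨u, rfl⟩ := hC
                exact pv_caseC u (ih u (by simp at hlen; omega)
                  (pvPreL_mono (List.suffix_append _ _).isInfix hp))
              · cases s with
                | nil =>
                  rw [show pvPassA [] = [] by
                    simp only [pvPassA]
                    rw [pv_replace_nil _ _ (by simp), pv_replace_nil _ _ (by simp),
                        pv_replace_nil _ _ (by simp), pv_replace_nil _ _ (by simp),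
                        pv_replace_nil _ _ (by simp), pv_replace_nil _ _ (by simp)]]
                  simp [optimiseScan]
                | cons c t =>
                  exact pv_caseNone c t
                    (ih t (by simp at hlen; omega)
                      (pvPreL_mono (List.suffix_cons c t).isInfix hp))
                    hV hI hL hX hD hC
                    (hp' _ (by simp [pvBadT]))
                    (hp' _ (by simp [pvBadT]))
                    (hp' _ (by simp [pvBadT]))

-- ===== VERDICT (by name: the statement is the Claim_ definition above) =====
theorem optimise_spec : Claim_equal_optimise := by
  intro number _ hpre
  unfold Spec_optimise optimise_alt
  apply String.toList_inj.mp
  rw [pv_optimise_toList]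
  simp only [String.toList_ofList]
  exact pv_main number.toList.length number.toList le_rfl hpre
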